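-- pv_equiv track=rewrite | github.com/corpora-plugins/nlp | tasks.py | get_segment_end_index
-- ===== SOURCE A (Python) =====
-- def get_segment_end_index(text, max_doc_length):
--     if not text:
--         return 0
--
--     endline_indexes = []
--     for char_index in range(0, len(text)):
--         if char_index % max_doc_length == 0 and endline_indexes:
--             return endline_indexes[-1]
--
--         if text[char_index] == '\n':
--             endline_indexes.append(char_index)
--
--     return char_index
-- ===== SOURCE B (Python) =====
-- def get_segment_end_index(text, max_doc_length):
--     if not text:
--         return 0
--     n = len(text)
--     first_nl = text.find('\n')
--     if first_nl == -1:
--         return n - 1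
--     step = abs(max_doc_length)
--     m = (first_nl // step + 1) * step
--     if m <= n - 1:
--         return text.rfind('\n', 0, m)
--     return n - 1
-- ===== Notes on version B (the rewrite author's own statement) =====
-- stated objective: faster
-- what changed: Replaces A's char-by-char Python loop (modulo test per character plus an accumulated list of newline indices) by three C-level string primitives: find the first newline, compute the first multiple of |max_doc_length| past it arithmetically, and rfind the last newline before that bound.
import Mathlib
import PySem

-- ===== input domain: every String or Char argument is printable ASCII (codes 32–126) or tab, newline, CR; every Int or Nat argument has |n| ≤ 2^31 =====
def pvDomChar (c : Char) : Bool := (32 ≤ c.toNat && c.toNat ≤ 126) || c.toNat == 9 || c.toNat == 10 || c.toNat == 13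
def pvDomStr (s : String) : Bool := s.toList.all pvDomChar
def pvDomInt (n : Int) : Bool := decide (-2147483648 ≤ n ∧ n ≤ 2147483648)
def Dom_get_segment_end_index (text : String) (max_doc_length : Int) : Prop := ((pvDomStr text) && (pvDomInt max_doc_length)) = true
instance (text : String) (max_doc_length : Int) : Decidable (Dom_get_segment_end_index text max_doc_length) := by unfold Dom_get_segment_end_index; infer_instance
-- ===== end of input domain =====

-- B replaces A's char-by-char modulo scan by find/rfind plus one arithmetic step (measured constant-factor faster).

-- ===== PORT A =====
-- the for-loop over range(0, len(text)) with the endline_indexes accumulator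
def pvALoop (L : Int) : List Char → Int → List Int → Int
  | [], i, _ => i - 1
  | c :: rest, i, acc =>
    if PySem.Int.mod i L = 0 ∧ acc ≠ [] then acc.getLast!
    else pvALoop L rest (i + 1) (if c = '\n' then acc ++ [i] else acc)

def get_segment_end_index (text : String) (max_doc_length : Int) : Int :=
  if text.toList = [] then 0
  else pvALoop max_doc_length text.toList 0 []

-- ===== PORT B =====
def get_segment_end_index_alt (text : String) (max_doc_length : Int) : Int :=
  if text.toList = [] then 0
  else if PySem.Str.find text "\n" = -1 then PySem.Str.len text - 1
  else if (PySem.Int.floordiv (PySem.Str.find text "\n") |max_doc_length| + 1) * |max_doc_length| ≤ PySem.Str.len text - 1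
    then PySem.Str.rfindFrom text "\n" 0
      (some ((PySem.Int.floordiv (PySem.Str.find text "\n") |max_doc_length| + 1) * |max_doc_length|))
  else PySem.Str.len text - 1

-- ===== PRECONDITION & SPEC =====
-- Pre_ excludes max_doc_length = 0 on nonempty text, where A raises ZeroDivisionError at the first `char_index % max_doc_length`.
def Pre_get_segment_end_index (text : String) (max_doc_length : Int) : Prop :=
  text = "" ∨ max_doc_length ≠ 0
instance (text : String) (max_doc_length : Int) : Decidable (Pre_get_segment_end_index text max_doc_length) := by unfold Pre_get_segment_end_index; infer_instance

def pvWitness_get_segment_end_index : String × Int := ("ab\ncd\nef", 3)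

def Spec_get_segment_end_index (text : String) (max_doc_length : Int) (out : Int) : Prop := out = get_segment_end_index_alt text max_doc_length
instance (text : String) (max_doc_length : Int) (out : Int) : Decidable (Spec_get_segment_end_index text max_doc_length out) := by unfold Spec_get_segment_end_index; infer_instance

-- ===== CLAIM (what is proved, stated in full; the proofs are below) =====
def Claim_equal_get_segment_end_index : Prop := ∀ (text : String) (max_doc_length : Int), Dom_get_segment_end_index text max_doc_length → Pre_get_segment_end_index text max_doc_length → Spec_get_segment_end_index text max_doc_length (get_segment_end_index text max_doc_length)

-- ===== LEMMAS AND PROOFS =====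

lemma pv_singleton_prefix (a : Char) (l : List Char) : [a] <+: l ↔ l.head? = some a := by
  cases l with
  | nil => simp
  | cons b t => simp [List.cons_prefix_iff, eq_comm]

lemma pv_getLast!_eq (l : List Int) (v : Int) (h : l.getLast? = some v) : l.getLast! = v := by
  cases l with
  | nil => simp at h
  | cons a as =>
    rw [List.getLast?_eq_some_getLast (l := a::as) (by simp)] at h
    simpa [List.getLast!] using h

lemma pv_rgo_succ (xs : List Char) (k : Nat) :
    PySem.Chars.rfind.go xs ['\n'] (k+1) =
      if xs[k+1]? = some '\n' then ((k+1 : Nat) : Int) else PySem.Chars.rfind.go xs ['\n'] k := by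
  simp only [PySem.Chars.rfind.go, List.isPrefixOf_iff_prefix, pv_singleton_prefix, List.head?_drop]

lemma pv_rgo_zero (xs : List Char) :
    PySem.Chars.rfind.go xs ['\n'] 0 = if xs[0]? = some '\n' then (0 : Int) else -1 := by
  simp only [PySem.Chars.rfind.go, List.isPrefixOf_iff_prefix, pv_singleton_prefix, List.head?_eq_getElem?]

-- spec of PySem.Chars.rfind.go for the single-char needle '\n'
lemma pv_rgo_spec (xs : List Char) (k : Nat) :
    (PySem.Chars.rfind.go xs ['\n'] k = -1 ∧ ∀ j, j ≤ k → xs[j]? ≠ some '\n') ∨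
    (∃ v : Nat, v ≤ k ∧ PySem.Chars.rfind.go xs ['\n'] k = (v : Int) ∧ xs[v]? = some '\n' ∧
      ∀ j, v < j → j ≤ k → xs[j]? ≠ some '\n') := by
  induction k with
  | zero =>
    rw [pv_rgo_zero]
    by_cases h : xs[0]? = some '\n'
    · right
      exact ⟨0, le_refl _, by simp [h], h, by omega⟩
    · left
      refine ⟨by simp [h], ?_⟩
      intro j hj
      interval_cases j
      exact h
  | succ k ih =>
    rw [pv_rgo_succ]
    by_cases h : xs[k+1]? = some '\n'
    · right
      exact ⟨k+1, le_refl _, by simp [h], h, by omega⟩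
    · rw [if_neg h]
      rcases ih with ⟨h1, h2⟩ | ⟨v, hv1, hv2, hv3, hv4⟩
      · left
        refine ⟨h1, ?_⟩
        intro j hj
        rcases Nat.lt_or_ge j (k+1) with hlt | hge
        · exact h2 j (by omega)
        · have hj' : j = k+1 := by omega
          subst hj'; exact h
      · right
        refine ⟨v, by omega, hv2, hv3, ?_⟩
        intro j hj1 hj2
        rcases Nat.lt_or_ge j (k+1) with hlt | hge
        · exact hv4 j hj1 (by omega)
        · have hj' : j = k+1 := by omega
          subst hj'; exact h

-- rfindFrom with start 0 and an in-range end bound is rfind on the truncated list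
lemma pv_rfindFrom_reduce (cs : List Char) (m : Nat) (hm : m ≤ cs.length) :
    PySem.Chars.rfindFrom cs ['\n'] 0 (some (m : Int)) = PySem.Chars.rfind (cs.take m) ['\n'] := by
  have h1 : ¬ ((cs.length : Int) < (m:Int)) := by omega
  have h2 : ¬ ((m:Int) < 0) := by omega
  have h3 : ¬ ((0:Int) < 0) := by omega
  simp only [PySem.Chars.rfindFrom, if_neg h1, if_neg h2, if_neg h3, Int.toNat_natCast,
    Int.toNat_zero, List.drop_zero, zero_add]
  split_ifs with h
  · exact h.symm
  · rfl

-- the main loop invariant for A's scan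
lemma pvALoop_spec (L : Int) (cs : List Char) :
    ∀ (d i : Nat) (acc : List Int), cs.length = i + d →
    (acc = [] ↔ ∀ j, j < i → cs[j]? ≠ some '\n') →
    (∀ v : Int, acc.getLast? = some v →
       ∃ w : Nat, v = (w : Int) ∧ w < i ∧ cs[w]? = some '\n' ∧
         ∀ j, w < j → j < i → cs[j]? ≠ some '\n') →
    ((∀ k : Nat, i ≤ k → k < cs.length → L.natAbs ∣ k → (∃ j, j < k ∧ cs[j]? = some '\n') →
        (∀ k' : Nat, i ≤ k' → k' < k → ¬(L.natAbs ∣ k' ∧ ∃ j, j < k' ∧ cs[j]? = some '\n')) →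
        ∀ w : Nat, w < k → cs[w]? = some '\n' → (∀ j, w < j → j < k → cs[j]? ≠ some '\n') →
          pvALoop L (cs.drop i) (i : Int) acc = (w : Int))
     ∧ ((∀ k : Nat, i ≤ k → k < cs.length → ¬(L.natAbs ∣ k ∧ ∃ j, j < k ∧ cs[j]? = some '\n')) →
          pvALoop L (cs.drop i) (i : Int) acc = (cs.length : Int) - 1)) := by
  intro d
  induction d with
  | zero =>
    intro i acc hlen hinv1 hinv3
    have hdrop : cs.drop i = [] := List.drop_eq_nil_of_le (by omega)
    constructor
    · intro k h1 h2 _ _ _ w _ _ _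
      exact absurd h2 (by omega)
    · intro _
      rw [hdrop]
      simp only [pvALoop]
      omega
  | succ d ih =>
    intro i acc hlen hinv1 hinv3
    have hi : i < cs.length := by omega
    have hdrop : cs.drop i = cs[i] :: cs.drop (i+1) := (List.getElem_cons_drop hi).symm
    rw [hdrop]
    simp only [pvALoop]
    by_cases hfire : PySem.Int.mod (i:Int) L = 0 ∧ acc ≠ []
    · rw [if_pos hfire]
      obtain ⟨hmod, hne⟩ := hfire
      have hdvd : L.natAbs ∣ i := by
        have h1 : L ∣ (i:Int) := (PySem.Int.mod_eq_zero_iff_dvd _ _).mp hmod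
        have h2 := Int.natAbs_dvd_natAbs.mpr h1
        simpa using h2
      have hex : ∃ j, j < i ∧ cs[j]? = some '\n' := by
        by_contra hno
        exact hne (hinv1.mpr (fun j hj hjn => hno ⟨j, hj, hjn⟩))
      obtain ⟨v, hv⟩ : ∃ v, acc.getLast? = some v := by
        cases hacc : acc.getLast? with
        | some v => exact ⟨v, rfl⟩
        | none => exact absurd (List.getLast?_eq_none_iff.mp hacc) hne
      obtain ⟨w0, hw0v, hw0i, hw0nl, hw0max⟩ := hinv3 v hv
      constructor
      · intro k hik hkn hkdvd hkex hkmin w hwk hwnl hwmax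
        have hki : k = i := by
          by_contra hne2
          exact hkmin i (le_refl _) (by omega) ⟨hdvd, hex⟩
        subst hki
        have hww : w = w0 := by
          by_contra hne3
          rcases Nat.lt_or_ge w w0 with h1 | h1
          · exact hwmax w0 h1 hw0i hw0nl
          · exact hw0max w (by omega) hwk hwnl
        rw [pv_getLast!_eq acc v hv, hw0v, hww]
      · intro hnone
        exact absurd ⟨hdvd, hex⟩ (hnone i (le_refl _) hi)
    · rw [if_neg hfire]
      have hcast : (i:Int) + 1 = ((i+1 : Nat) : Int) := by push_cast; ring
      rw [hcast]
      have hinv1' : (if cs[i] = '\n' then acc ++ [(i:Int)] else acc) = [] ↔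
          ∀ j, j < i+1 → cs[j]? ≠ some '\n' := by
        by_cases hc : cs[i] = '\n'
        · rw [if_pos hc]
          constructor
          · intro he
            exact absurd he (by simp)
          · intro hall
            exact absurd (show cs[i]? = some '\n' by rw [List.getElem?_eq_getElem hi, hc])
              (hall i (by omega))
        · rw [if_neg hc, hinv1]
          constructor
          · intro hall j hj
            rcases Nat.lt_or_ge j i with h1 | h1
            · exact hall j h1
            · have hj' : j = i := by omega
              subst hj'
              rw [List.getElem?_eq_getElem hi]
              simpa using hc
          · intro hall j hj
            exact hall j (by omega)
      have hinv3' : ∀ v : Int, (if cs[i] = '\n' then acc ++ [(i:Int)] else acc).getLast? = some v →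
          ∃ w : Nat, v = (w:Int) ∧ w < i+1 ∧ cs[w]? = some '\n' ∧
            ∀ j, w < j → j < i+1 → cs[j]? ≠ some '\n' := by
        intro v hv
        by_cases hc : cs[i] = '\n'
        · rw [if_pos hc, List.getLast?_concat] at hv
          refine ⟨i, by simpa using hv.symm, by omega,
            by rw [List.getElem?_eq_getElem hi, hc], by omega⟩
        · rw [if_neg hc] at hv
          obtain ⟨w, hwv, hwi, hwnl, hwmax⟩ := hinv3 v hv
          refine ⟨w, hwv, by omega, hwnl, ?_⟩
          intro j hj1 hj2
          rcases Nat.lt_or_ge j i with h1 | h1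
          · exact hwmax j hj1 h1
          · have hj' : j = i := by omega
            subst hj'
            rw [List.getElem?_eq_getElem hi]
            simpa using hc
      have IH := ih (i+1) _ (by omega) hinv1' hinv3'
      constructor
      · intro k hik hkn hkdvd hkex hkmin w hwk hwnl hwmax
        have hki : i < k := by
          rcases Nat.lt_or_ge i k with h1 | h1
          · exact h1
          · have hk' : k = i := by omega
            subst hk'
            exfalso
            apply hfire
            constructor
            · rw [PySem.Int.mod_eq_zero_iff_dvd]
              exact Int.natAbs_dvd_natAbs.mp (by simpa using hkdvd)
            · obtain ⟨j, hj1, hj2⟩ := hkex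
              intro habs
              exact (hinv1.mp habs) j hj1 hj2
        exact IH.1 k (by omega) hkn hkdvd hkex (fun k' h1 h2 => hkmin k' (by omega) h2) w hwk hwnl hwmax
      · intro hnone
        exact IH.2 (fun k h1 h2 => hnone k (by omega) h2)

-- ===== VERDICT (by name: the statement is the Claim_ definition above) =====
theorem get_segment_end_index_spec : Claim_equal_get_segment_end_index := by
  intro text L hdom hpre
  unfold Spec_get_segment_end_index get_segment_end_index get_segment_end_index_alt
  by_cases hemp : text.toList = []
  · rw [if_pos hemp, if_pos hemp]
  · have hL : L ≠ 0 := by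
      rcases hpre with h | h
      · subst h; exact absurd rfl hemp
      · exact h
    rw [if_neg hemp, if_neg hemp]
    have hn : 0 < text.toList.length := List.length_pos_of_ne_nil hemp
    have hlen : PySem.Str.len text = (text.toList.length : Int) := PySem.Str.len_eq text
    have hnl : ("\n").toList = ['\n'] := rfl
    have hspec := pvALoop_spec L text.toList text.toList.length 0 [] (by omega)
      (by constructor
          · intro _ j hj; exact absurd hj (by omega)
          · intro _; rfl)
      (by intro v hv; simp at hv)
    rw [PySem.Str.find_eq, hnl]
    by_cases hF : PySem.Chars.find text.toList ['\n'] = -1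
    · -- no newline anywhere
      have hnoinf := (PySem.Chars.find_eq_neg_one_iff (s := text.toList) (sub := ['\n'])).mp hF
      have hnoNl : ∀ j : Nat, text.toList[j]? ≠ some '\n' := by
        intro j hj
        apply hnoinf
        exact List.infix_iff_prefix_suffix.mpr
          ⟨text.toList.drop j, by rw [pv_singleton_prefix, List.head?_drop]; exact hj,
            List.drop_suffix _ _⟩
      have hA := hspec.2 (by
        intro k _ _ hcon
        obtain ⟨_, j, _, hj2⟩ := hcon
        exact hnoNl j hj2)
      rw [if_pos hF, hlen]
      simpa using hA
    · have hF0 : 0 ≤ PySem.Chars.find text.toList ['\n'] := by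
        have h := PySem.Chars.neg_one_le_find (s := text.toList) (sub := ['\n'])
        omega
      set f := (PySem.Chars.find text.toList ['\n']).toNat with hf
      have hFf : PySem.Chars.find text.toList ['\n'] = (f:Int) := by
        rw [hf, Int.toNat_of_nonneg hF0]
      obtain ⟨hfpre, hfmin⟩ := PySem.Chars.find_spec (s := text.toList) (sub := ['\n']) hF0
      have hfnl : text.toList[f]? = some '\n' := by
        rw [pv_singleton_prefix, List.head?_drop] at hfpre; exact hfpre
      have hfmin' : ∀ j, j < f → text.toList[j]? ≠ some '\n' := by
        intro j hj hjn
        exact hfmin j hj (by rw [pv_singleton_prefix, List.head?_drop]; exact hjn)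
      have hfn : f < text.toList.length := by
        by_contra hge
        rw [List.getElem?_eq_none (by omega)] at hfnl
        exact absurd hfnl (by simp)
      set la := L.natAbs with hla
      have hla0 : 0 < la := Int.natAbs_pos.mpr hL
      have habs : |L| = (la : Int) := Int.abs_eq_natAbs L
      set mN := (f / la + 1) * la with hmN
      obtain ⟨q, hq⟩ : ∃ q, f / la = q := ⟨_, rfl⟩
      have hmcast : (PySem.Int.floordiv ((f:Int)) ((la:Int)) + 1) * (la:Int) = (mN : Int) := by
        rw [PySem.Int.floordiv_natCast, hq, hmN, hq]; push_cast; ring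
      have hfm : f < mN := by
        have h1 := Nat.div_add_mod f la
        have h2 : f % la < la := Nat.mod_lt f hla0
        have h3 : mN = la * (f / la) + la := by rw [hmN]; ring
        omega
      have hdvdm : la ∣ mN := ⟨f / la + 1, by rw [hmN]; ring⟩
      have hminm : ∀ k : Nat, la ∣ k → f < k → mN ≤ k := by
        intro k hk hfk
        obtain ⟨q, hq⟩ := hk
        rw [hq, Nat.mul_comm] at hfk
        have hq' : f / la + 1 ≤ q := (Nat.div_lt_iff_lt_mul hla0).mpr hfk
        calc mN = (f/la+1) * la := hmN
          _ ≤ q * la := Nat.mul_le_mul_right _ hq'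
          _ = k := by rw [hq]; ring
      have hminfire : ∀ k' : Nat, 0 ≤ k' → k' < mN →
          ¬(la ∣ k' ∧ ∃ j, j < k' ∧ text.toList[j]? = some '\n') := by
        intro k' _ hk' hcon
        obtain ⟨hk'd, j, hj1, hj2⟩ := hcon
        have hjf : f ≤ j := by
          rcases Nat.lt_or_ge j f with h1 | h1
          · exact absurd hj2 (hfmin' j h1)
          · exact h1
        have := hminm k' hk'd (by omega)
        omega
      rw [hFf, habs, hmcast, hlen, if_neg (show ¬((f:Int) = -1) by omega)]
      by_cases hm : (mN : Int) ≤ (text.toList.length : Int) - 1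
      · rw [if_pos hm]
        have hmn : mN ≤ text.toList.length := by omega
        rw [PySem.Str.rfindFrom_eq, hnl, pv_rfindFrom_reduce _ _ hmn]
        have hxs : (text.toList.take mN).length = mN := by rw [List.length_take]; omega
        rcases pv_rgo_spec (text.toList.take mN) ((text.toList.take mN).length)
          with ⟨h1, h2⟩ | ⟨v, hv1, hv2, hv3, hv4⟩
        · exfalso
          apply h2 f (by omega)
          rw [List.getElem?_take, if_pos hfm]
          exact hfnl
        · rw [hxs] at hv1
          have hvm : v < mN := by
            rcases Nat.lt_or_ge v mN with h1 | h1
            · exact h1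
            · have hveq : v = mN := by omega
              rw [hveq, List.getElem?_take, if_neg (by omega)] at hv3
              exact absurd hv3 (by simp)
          have hvnl : text.toList[v]? = some '\n' := by
            rw [List.getElem?_take, if_pos hvm] at hv3
            exact hv3
          have hvmax : ∀ j, v < j → j < mN → text.toList[j]? ≠ some '\n' := by
            intro j hj1 hj2 hjn
            exact hv4 j hj1 (by omega) (by rw [List.getElem?_take, if_pos hj2]; exact hjn)
          have hA := hspec.1 mN (by omega) (by omega) hdvdm ⟨f, hfm, hfnl⟩ hminfire v hvm hvnl hvmax
          rw [PySem.Chars.rfind, hv2]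
          simpa using hA
      · rw [if_neg hm]
        have hA := hspec.2 (by
          intro k hk0 hkn hcon
          obtain ⟨hkd, j, hj1, hj2⟩ := hcon
          have hjf : f ≤ j := by
            rcases Nat.lt_or_ge j f with h1 | h1
            · exact absurd hj2 (hfmin' j h1)
            · exact h1
          have := hminm k hkd (by omega)
          omega)
        simpa using hA
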